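-- pv_equiv track=rewrite | github.com/constcut/cyclicprime | src/CyclicResearch.py | prepare_x
-- ===== SOURCE A (Python) =====
-- import math
--
-- def prepare_x(L, end):
--
--     X = []
--
--     X.append(L[0])
--
--     for i in range(1, math.ceil(end) - 1):
--
--         Xi = 0
--         for j in range(0, i + 1):
--
--             if L[j] == 0:
--                 Xi += 1
--             else:
--                 Xi += L[j] + 1
--
--         X.append(Xi - L[0])
--
--     return X
-- ===== SOURCE B (Python) =====
-- import math
--
-- def prepare_x(L, end):
--     m = math.ceil(end) - 1
--     X = [L[0]]
--     s = 1 if L[0] == 0 else L[0] + 1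
--     for i in range(1, m):
--         s += 1 if L[i] == 0 else L[i] + 1
--         X.append(s - L[0])
--     return X
-- ===== Notes on version B (the rewrite author's own statement) =====
-- stated objective: faster
-- what changed: A re-sums the whole prefix L[0..i] from scratch for every output element; B keeps one running cumulative sum and emits each element in a single pass.
import Mathlib
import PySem

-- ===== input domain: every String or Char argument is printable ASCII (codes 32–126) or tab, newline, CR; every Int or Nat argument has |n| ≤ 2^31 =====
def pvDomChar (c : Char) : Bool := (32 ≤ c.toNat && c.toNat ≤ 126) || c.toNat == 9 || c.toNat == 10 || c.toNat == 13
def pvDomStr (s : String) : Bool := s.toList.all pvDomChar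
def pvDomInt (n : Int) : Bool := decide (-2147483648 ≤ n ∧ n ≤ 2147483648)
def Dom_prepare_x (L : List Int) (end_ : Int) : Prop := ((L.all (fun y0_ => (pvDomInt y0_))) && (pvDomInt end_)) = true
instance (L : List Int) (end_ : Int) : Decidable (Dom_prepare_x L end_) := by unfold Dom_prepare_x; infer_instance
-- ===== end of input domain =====

-- B replaces A's quadratic re-summation of the prefix at every i by a single running
-- cumulative sum (O(n) instead of O(n^2)); same return value on every input A accepts.
-- (math.ceil(end) = end on the Int domain of this file, so the ports write end_ directly.)

-- ===== PORT A =====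
-- literal transliteration of A: X = [L[0]]; for i in range(1, end-1): re-sum prefix 0..i
def prepare_x (L : List Int) (end_ : Int) : List Int :=
  let X : List Int := [PySem.List.pyGetD L 0 0]
  (PySem.List.pyRange 1 (end_ - 1)).foldl (fun X i =>
    let Xi : Int :=
      (PySem.List.pyRange 0 (i + 1)).foldl (fun Xi j =>
        if PySem.List.pyGetD L j 0 = 0 then Xi + 1
        else Xi + PySem.List.pyGetD L j 0 + 1) 0
    X ++ [Xi - PySem.List.pyGetD L 0 0]) X

-- ===== PORT B =====
-- literal transliteration of Source B: one pass with a running cumulative sum s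
def prepare_x_alt (L : List Int) (end_ : Int) : List Int :=
  let m := end_ - 1
  let l0 := PySem.List.pyGetD L 0 0
  let X : List Int := [l0]
  let s : Int := if l0 = 0 then 1 else l0 + 1
  ((PySem.List.pyRange 1 m).foldl (fun (p : List Int × Int) i =>
    let li := PySem.List.pyGetD L i 0
    let s := p.2 + (if li = 0 then 1 else li + 1)
    (p.1 ++ [s - l0], s)) (X, s)).1

-- ===== PRECONDITION & SPEC =====
-- Pre_ excludes exactly the inputs where Python A raises IndexError: empty L, or a
-- loop reaching an index end-2 beyond the end of L.
def Pre_prepare_x (L : List Int) (end_ : Int) : Prop :=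
  L ≠ [] ∧ (end_ ≤ 2 ∨ end_ - 1 ≤ (L.length : Int))
instance (L : List Int) (end_ : Int) : Decidable (Pre_prepare_x L end_) := by
  unfold Pre_prepare_x; infer_instance

def pvWitness_prepare_x : List Int × Int := ([2, 0, 3, 1], 5)

def Spec_prepare_x (L : List Int) (end_ : Int) (out : List Int) : Prop := out = prepare_x_alt L end_
instance (L : List Int) (end_ : Int) (out : List Int) : Decidable (Spec_prepare_x L end_ out) := by unfold Spec_prepare_x; infer_instance

-- ===== CLAIM (what is proved, stated in full; the proofs are below) =====
def Claim_equal_prepare_x : Prop := ∀ (L : List Int) (end_ : Int), Dom_prepare_x L end_ → Pre_prepare_x L end_ → Spec_prepare_x L end_ (prepare_x L end_)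

-- ===== LEMMAS AND PROOFS =====

-- weight of element j (1 for a zero, L[j]+1 otherwise), and the prefix sum S i = Σ_{j=0..i} f j
def pvF (L : List Int) (j : Int) : Int :=
  if PySem.List.pyGetD L j 0 = 0 then 1 else PySem.List.pyGetD L j 0 + 1

def pvS (L : List Int) (i : Int) : Int :=
  (PySem.List.pyRange 0 (i + 1)).foldl (fun a j => a + pvF L j) 0

lemma pvS_succ (L : List Int) (i : Int) (h : 0 ≤ i) :
    pvS L (i + 1) = pvS L i + pvF L (i + 1) := by
  unfold pvS
  rw [PySem.List.pyRange_one_succ_right (by omega : (0:Int) ≤ i + 1), List.foldl_append]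
  rfl

lemma pvS_zero (L : List Int) :
    pvS L 0 = (if PySem.List.pyGetD L 0 0 = 0 then (1:Int) else PySem.List.pyGetD L 0 0 + 1) := by
  unfold pvS
  rw [PySem.List.pyRange_one_succ_right (le_refl (0:Int))]
  simp [PySem.List.pyRange, pvF]

-- A's inner loop computes the prefix sum pvS L i
lemma innerA_eq_pvS (L : List Int) (i : Int) :
    (PySem.List.pyRange 0 (i + 1)).foldl (fun Xi j =>
        if PySem.List.pyGetD L j 0 = 0 then Xi + 1
        else Xi + PySem.List.pyGetD L j 0 + 1) 0 = pvS L i := by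
  unfold pvS
  congr 1
  funext Xi j
  unfold pvF
  split <;> ring

-- B's loop invariant: starting from (X0, S (a-1)) the fold over range(a, a+n)
-- appends S i - l0 for each i and ends with s = S (a-1+n)
lemma Bfold (L : List Int) (l0 : Int) :
    ∀ (n : Nat) (a : Int) (X0 : List Int), 1 ≤ a →
      (PySem.List.pyRange a (a + n)).foldl (fun (p : List Int × Int) i =>
          let li := PySem.List.pyGetD L i 0
          let s := p.2 + (if li = 0 then 1 else li + 1)
          (p.1 ++ [s - l0], s)) (X0, pvS L (a - 1)) =
        (X0 ++ (PySem.List.pyRange a (a + n)).map (fun i => pvS L i - l0),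
         pvS L (a - 1 + n)) := by
  intro n
  induction n with
  | zero =>
    intro a X0 _
    simp [PySem.List.pyRange]
  | succ k ih =>
    intro a X0 ha
    rw [PySem.List.pyRange_one_cons (by push_cast; omega : a < a + ((k : Nat) + 1 : Nat))]
    simp only [List.foldl_cons, List.map_cons]
    have hstep : pvS L (a - 1) + (if PySem.List.pyGetD L a 0 = 0 then (1:Int)
        else PySem.List.pyGetD L a 0 + 1) = pvS L a := by
      have := pvS_succ L (a - 1) (by omega)
      simp only [sub_add_cancel] at this
      rw [this]; unfold pvF; ring_nf
    rw [hstep]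
    have hr : a + ((k : Nat) + 1 : Nat) = (a + 1) + (k : Nat) := by push_cast; omega
    have h1 : pvS L ((a + 1) - 1) = pvS L a := by norm_num
    have := ih (a + 1) (X0 ++ [pvS L a - l0]) (by omega)
    rw [h1] at this
    rw [hr, this, Prod.mk.injEq]
    refine ⟨by simp, ?_⟩
    congr 1
    push_cast
    ring

theorem prepare_x_eq (L : List Int) (end_ : Int) :
    prepare_x L end_ = prepare_x_alt L end_ := by
  unfold prepare_x prepare_x_alt
  simp only [innerA_eq_pvS, PySem.List.foldl_append_singleton_eq_map
    (fun i => pvS L i - PySem.List.pyGetD L 0 0)]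
  by_cases h : 1 < end_ - 1
  · have hn : end_ - 1 = 1 + ((end_ - 2).toNat : Int) := by omega
    rw [hn, ← pvS_zero L]
    have hB := Bfold L (PySem.List.pyGetD L 0 0) (end_ - 2).toNat 1 [PySem.List.pyGetD L 0 0]
      (le_refl 1)
    simp only [show (1:Int) - 1 = 0 from by norm_num,
      show (0:Int) + ((end_ - 2).toNat : Int) = ((end_ - 2).toNat : Int) from by ring] at hB
    rw [hB]
  · have he : PySem.List.pyRange 1 (end_ - 1) = [] := by
      simp [PySem.List.pyRange]; omega
    rw [he]; simp

-- ===== VERDICT (by name: the statement is the Claim_ definition above) =====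
theorem prepare_x_spec : Claim_equal_prepare_x := by
  intro L end_ _ _
  unfold Spec_prepare_x
  exact prepare_x_eq L end_
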